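-- pv_equiv track=rewrite | github.com/LollipopKit/color-inverter | main.py | invert_one_char
-- ===== SOURCE A (Python) =====
-- char_invert_set = [
--     ['0', 'f'], ['1', 'e'], ['2', 'd'], ['3', 'c'], ['4', 'b'], ['5', 'a'], ['6', '9'], ['7', '8'],
-- ]
--
-- def invert_one_char(char: str) -> str:
--     '''
--     param: char: str (only contains one '0'-'9' or 'a'-'f')
--     return: str
--     '''
--     char = char.lower()
--     if len(char) == 1:
--         for s in char_invert_set:
--             if char == s[0]:
--                 return s[1]
--             if char == s[1]:
--                 return s[0]
--     raise ValueError(f'Invalid char: {char} with length {len(char)}')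
-- ===== SOURCE B (Python) =====
-- def invert_one_char(char: str) -> str:
--     char = char.lower()
--     digits = '0123456789abcdef'
--     if len(char) == 1 and char in digits:
--         return digits[15 - digits.index(char)]
--     raise ValueError(f'Invalid char: {char} with length {len(char)}')
-- ===== Notes on version B (the rewrite author's own statement) =====
-- stated objective: simpler
-- what changed: Replaces the scan over the 8-pair lookup table with arithmetic complement: the digit's index in the 16-character hex-digit string is subtracted from 15 and used to index the same string, so no pair list or loop remains.
import Mathlib
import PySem

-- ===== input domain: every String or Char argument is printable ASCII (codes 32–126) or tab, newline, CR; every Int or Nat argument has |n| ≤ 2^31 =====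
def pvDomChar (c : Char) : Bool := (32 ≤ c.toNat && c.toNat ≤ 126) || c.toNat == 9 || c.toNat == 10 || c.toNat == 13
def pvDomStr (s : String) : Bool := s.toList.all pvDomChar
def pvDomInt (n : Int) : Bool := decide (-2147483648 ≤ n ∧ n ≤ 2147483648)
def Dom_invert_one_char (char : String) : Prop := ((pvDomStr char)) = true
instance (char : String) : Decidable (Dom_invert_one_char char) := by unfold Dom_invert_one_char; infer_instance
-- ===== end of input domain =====

-- B replaces A's scan over the 8-pair inversion table by 15-minus-index arithmetic on the hex-digit string (simpler); inputs on which both raise ValueError are excluded by Pre_.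

-- ===== PORT A =====
def pvCharInvertSet : List (String × String) :=
  [("0","f"),("1","e"),("2","d"),("3","c"),("4","b"),("5","a"),("6","9"),("7","8")]

-- the 'for s in char_invert_set' loop; none = fall through to the raise
def pvInvertLoop : List (String × String) → String → Option String
  | [], _ => none
  | (a, b) :: rest, c =>
      if c == a then some b
      else if c == b then some a
      else pvInvertLoop rest c

-- the function body after 'char = char.lower()'
def pvInvertBodyA (c : String) : String :=
  if PySem.Str.len c == 1 then
    match pvInvertLoop pvCharInvertSet c with
    | some r => r
    | none => ""          -- raise ValueError (excluded by Pre_)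
  else ""                 -- raise ValueError (excluded by Pre_)

def invert_one_char (char : String) : String :=
  pvInvertBodyA (PySem.Str.lower char)

-- ===== PORT B =====
-- the function body after 'char = char.lower()'
def pvInvertBodyB (c : String) : String :=
  let digits := "0123456789abcdef"
  if PySem.Str.len c == 1 && PySem.Str.isIn c digits then
    match PySem.Str.pyGet? digits (15 - PySem.Str.find digits c) with
    | some ch => String.ofList [ch]
    | none => ""          -- unreachable under the guard
  else ""                 -- raise ValueError (excluded by Pre_)

def invert_one_char_alt (char : String) : String :=
  pvInvertBodyB (PySem.Str.lower char)

-- ===== PRECONDITION & SPEC =====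
-- A raises ValueError on every input whose lowercase form is not a single hex digit; Pre_ admits exactly the inputs on which A returns.
def Pre_invert_one_char (char : String) : Prop :=
  (char.toList.length == 1 && char.toList.all (fun c =>
    (48 ≤ c.toNat && c.toNat ≤ 57) || (97 ≤ c.toNat && c.toNat ≤ 102) || (65 ≤ c.toNat && c.toNat ≤ 70))) = true
instance (char : String) : Decidable (Pre_invert_one_char char) := by
  unfold Pre_invert_one_char; infer_instance
def pvWitness_invert_one_char : String := "A"

def Spec_invert_one_char (char : String) (out : String) : Prop := out = invert_one_char_alt char
instance (char : String) (out : String) : Decidable (Spec_invert_one_char char out) := by unfold Spec_invert_one_char; infer_instance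

-- ===== CLAIM (what is proved, stated in full; the proofs are below) =====
def Claim_equal_invert_one_char : Prop := ∀ (char : String), Dom_invert_one_char char → Pre_invert_one_char char → Spec_invert_one_char char (invert_one_char char)

-- ===== LEMMAS AND PROOFS =====
-- on every single hex character (either case) the two lowered bodies agree
theorem pvBodies_agree (c : Char)
    (h : (48 ≤ c.toNat ∧ c.toNat ≤ 57) ∨ (97 ≤ c.toNat ∧ c.toNat ≤ 102) ∨ (65 ≤ c.toNat ∧ c.toNat ≤ 70)) :
    pvInvertBodyA (String.ofList (PySem.Chars.lower [c]))
      = pvInvertBodyB (String.ofList (PySem.Chars.lower [c])) := by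
  have h22 : c.toNat = 48 ∨ c.toNat = 49 ∨ c.toNat = 50 ∨ c.toNat = 51 ∨ c.toNat = 52 ∨
      c.toNat = 53 ∨ c.toNat = 54 ∨ c.toNat = 55 ∨ c.toNat = 56 ∨ c.toNat = 57 ∨
      c.toNat = 97 ∨ c.toNat = 98 ∨ c.toNat = 99 ∨ c.toNat = 100 ∨ c.toNat = 101 ∨
      c.toNat = 102 ∨ c.toNat = 65 ∨ c.toNat = 66 ∨ c.toNat = 67 ∨ c.toNat = 68 ∨
      c.toNat = 69 ∨ c.toNat = 70 := by omega
  rcases h22 with h|h|h|h|h|h|h|h|h|h|h|h|h|h|h|h|h|h|h|h|h|h <;>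
    · rw [← Char.ofNat_toNat c, h]
      decide

-- ===== VERDICT (by name: the statement is the Claim_ definition above) =====
theorem invert_one_char_spec : Claim_equal_invert_one_char := by
  intro char _ hpre
  unfold Pre_invert_one_char at hpre
  simp only [Bool.and_eq_true, beq_iff_eq, List.all_eq_true, Bool.or_eq_true,
    decide_eq_true_eq] at hpre
  obtain ⟨hlen, hhex⟩ := hpre
  obtain ⟨c, hc⟩ := List.length_eq_one_iff.mp hlen
  have hlow : PySem.Str.lower char = String.ofList (PySem.Chars.lower [c]) := by
    rw [← hc, ← PySem.Str.toList_lower]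
    exact String.ofList_toList.symm
  unfold Spec_invert_one_char invert_one_char invert_one_char_alt
  rw [hlow]
  exact pvBodies_agree c (by have := hhex c (hc ▸ List.mem_singleton_self c); tauto)
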